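-- pv_equiv track=rewrite | github.com/kimhyeongjun95/AlgoPullgo | 040주차/징검다리/hyunseo.py | solution
-- ===== SOURCE A (Python) =====
-- def solution(distance, rocks, n):
--     rocks.sort(reverse = True)
--
--     dist = []
--
--     this = 0
--     while rocks:
--         dist.append(rocks[-1] - this)
--         this = rocks.pop()
--
--     dist.append(distance - this)
--
--     for _ in range(n):
--         min_idx = dist.index(min(dist))
--
--         if min_idx == 0:
--             min_val = dist.pop(0)
--             dist[0] += min_val
--         elif min_idx == len(dist)-1:
--             min_val = dist.pop()
--             dist[-1] += min_val
--         else: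
--             if dist[min_idx-1] < dist[min_idx+1]:
--                 min_val = dist.pop(min_idx)
--                 dist[min_idx-1] += min_val
--             else:
--                 min_val = dist.pop(min_idx)
--                 dist[min_idx] += min_val
--
--     return min(dist)
-- ===== SOURCE B (Python) =====
-- def _insort_desc(q, item):
--     # insert item into q (kept sorted in descending order) by binary search
--     lo, hi = 0, len(q)
--     while lo < hi:
--         mid = (lo + hi) // 2
--         if q[mid] > item:
--             lo = mid + 1
--         else:
--             hi = mid
--     q.insert(lo, item)
--
--
-- def _find_id(cells, i):
--     # binary search for the cell with id i (ids are strictly increasing)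
--     lo, hi = 0, len(cells)
--     while lo < hi:
--         mid = (lo + hi) // 2
--         if cells[mid][0] < i:
--             lo = mid + 1
--         else:
--             hi = mid
--     if lo < len(cells) and cells[lo][0] == i:
--         return lo
--     return None
--
--
-- def solution(distance, rocks, n):
--     pts = sorted(rocks)
--     vals = [b - a for a, b in zip([0] + pts, pts + [distance])]
--     cells = list(enumerate(vals))      # (id, gap), ids strictly increasing along the list
--     q = []                             # event queue: (gap, id), sorted descending, min at the end
--     for i, v in enumerate(vals):
--         _insort_desc(q, (v, i))
--     for _ in range(n):
--         while True:                    # pop the smallest entry, lazily skipping stale ones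
--             v, i = q.pop()
--             k = _find_id(cells, i)
--             if k is not None and cells[k][1] == v:
--                 break
--         if k == 0:
--             j = 0
--         elif k == len(cells) - 1 or cells[k - 1][1] < cells[k + 1][1]:
--             j = k - 1
--         else:
--             j = k
--         lid, lv = cells[j]
--         merged = lv + cells[j + 1][1]
--         cells[j:j + 2] = [(lid, merged)]
--         _insort_desc(q, (merged, lid))
--     return min(v for _, v in cells)
-- ===== Notes on version B (the rewrite author's own statement) =====
-- stated objective: faster
-- what changed: A rescans the whole gap list every iteration (min, index, pop); B presorts all (gap,id) events into a descending queue once, pops the minimum with lazy deletion of stale entries, locates the live cell by binary search over strictly increasing ids, and splices the merged cell back while pushing one new event; B also leaves rocks unmutated (A sorts it in place).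
import Mathlib
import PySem

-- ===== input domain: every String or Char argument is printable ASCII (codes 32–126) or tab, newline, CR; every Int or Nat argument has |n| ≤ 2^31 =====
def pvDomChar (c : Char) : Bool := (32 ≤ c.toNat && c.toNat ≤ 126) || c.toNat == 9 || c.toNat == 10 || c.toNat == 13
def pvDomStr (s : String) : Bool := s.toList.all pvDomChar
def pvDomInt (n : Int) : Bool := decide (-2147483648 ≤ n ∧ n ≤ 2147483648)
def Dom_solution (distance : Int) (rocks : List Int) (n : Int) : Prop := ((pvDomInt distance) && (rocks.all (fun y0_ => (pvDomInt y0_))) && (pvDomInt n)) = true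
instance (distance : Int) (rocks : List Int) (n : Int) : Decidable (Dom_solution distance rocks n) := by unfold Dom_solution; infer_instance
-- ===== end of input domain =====

-- B replaces A's per-iteration full scans (min, index, pop) by a presorted descending event
-- queue with lazy deletion plus binary search over cell ids (measurably faster); equivalence is
-- about the RETURN value only (A sorts the 'rocks' argument in place, B leaves it untouched).

-- ===== PORT A =====
-- while rocks: dist.append(rocks[-1] - this); this = rocks.pop()
def solBuild (rocks : List Int) (this : Int) (dist : List Int) : List Int × Int :=
  match h : rocks.getLast? with
  | none => (dist, this)
  | some last => solBuild rocks.dropLast last (dist ++ [last - this])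
termination_by rocks.length
decreasing_by
  have hne : rocks ≠ [] := by intro he; simp [he] at h
  have h1 : 0 < rocks.length := List.length_pos_of_ne_nil hne
  simp only [List.length_dropLast]; omega

-- one pass of A's "for _ in range(n)" body
def solStep (dist : List Int) : List Int :=
  match PySem.List.min? dist (fun x => x) with
  | none => dist
  | some m =>
    match PySem.List.index? dist m with
    | none => dist
    | some i =>
      if i = 0 then
        match PySem.List.pop? dist 0 with
        | none => dist
        | some (v, rest) => PySem.List.pySetD rest 0 (PySem.List.pyGetD rest 0 0 + v)
      else if i = dist.length - 1 then
        match PySem.List.pop? dist (-1) with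
        | none => dist
        | some (v, rest) => PySem.List.pySetD rest (-1) (PySem.List.pyGetD rest (-1) 0 + v)
      else
        if PySem.List.pyGetD dist ((i : Int) - 1) 0 < PySem.List.pyGetD dist ((i : Int) + 1) 0 then
          match PySem.List.pop? dist (i : Int) with
          | none => dist
          | some (v, rest) => PySem.List.pySetD rest ((i : Int) - 1) (PySem.List.pyGetD rest ((i : Int) - 1) 0 + v)
        else
          match PySem.List.pop? dist (i : Int) with
          | none => dist
          | some (v, rest) => PySem.List.pySetD rest (i : Int) (PySem.List.pyGetD rest (i : Int) 0 + v)

def solution (distance : Int) (rocks : List Int) (n : Int) : Int :=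
  let rocks' := PySem.List.sorted rocks (fun x => x) true
  let bd := solBuild rocks' 0 []
  let dist := bd.1 ++ [distance - bd.2]
  let dist := (PySem.List.pyRange 0 n 1).foldl (fun d _ => solStep d) dist
  match PySem.List.min? dist (fun x => x) with
  | none => 0      -- unreachable under Pre_: dist is nonempty
  | some m => m

-- ===== PORT B =====
-- Python tuple comparison 'q[mid] > item' on (Int, Int) pairs (lexicographic)
def pairGt (a b : Int × Int) : Bool := a.1 > b.1 || (a.1 == b.1 && a.2 > b.2)

-- the lo/hi bisection loop of _insort_desc (mid is always < hi ≤ len q, so getD is exact)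
def insortLoop (q : List (Int × Int)) (item : Int × Int) (lo hi : Nat) : Nat :=
  if h : lo < hi then
    let mid := (lo + hi) / 2
    if pairGt (q.getD mid (0, 0)) item then insortLoop q item (mid + 1) hi
    else insortLoop q item lo mid
  else lo
termination_by hi - lo
decreasing_by all_goals omega

-- q.insert(lo, item)
def insortDesc (q : List (Int × Int)) (item : Int × Int) : List (Int × Int) :=
  PySem.List.insert q ((insortLoop q item 0 q.length : Nat) : Int) item

-- the lo/hi bisection loop of _find_id (mid < hi ≤ len cells, so getD is exact)
def findLoop (cells : List (Int × Int)) (i : Int) (lo hi : Nat) : Nat :=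
  if h : lo < hi then
    let mid := (lo + hi) / 2
    if (cells.getD mid (0, 0)).1 < i then findLoop cells i (mid + 1) hi
    else findLoop cells i lo mid
  else lo
termination_by hi - lo
decreasing_by all_goals omega

def findId (cells : List (Int × Int)) (i : Int) : Option Nat :=
  let lo := findLoop cells i 0 cells.length
  if h : lo < cells.length then
    if (cells.getD lo (0, 0)).1 == i then some lo else none
  else none

-- the 'while True' lazy-deletion pop: skip queue entries that no longer match a live cell
def popLoop (cells q : List (Int × Int)) : Option ((Int × Int) × Nat × List (Int × Int)) :=
  match h : q.getLast? with
  | none => none      -- Python raises IndexError on q.pop(); unreachable under Pre_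
  | some vi =>
    match findId cells vi.2 with
    | some k =>
      if (cells.getD k (0, 0)).2 == vi.1 then some (vi, k, q.dropLast)
      else popLoop cells q.dropLast
    | none => popLoop cells q.dropLast
termination_by q.length
decreasing_by
  all_goals
    have hne : q ≠ [] := by intro he; simp [he] at h
    have h1 : 0 < q.length := List.length_pos_of_ne_nil hne
    simp only [List.length_dropLast]; omega

-- one pass of B's "for _ in range(n)" body
def altStep (st : List (Int × Int) × List (Int × Int)) : List (Int × Int) × List (Int × Int) :=
  match popLoop st.1 st.2 with
  | none => st      -- Python raises there; unreachable under Pre_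
  | some (_, k, q') =>
    let cells := st.1
    let j := if k = 0 then 0
             else if k = cells.length - 1 ∨ (cells.getD (k - 1) (0, 0)).2 < (cells.getD (k + 1) (0, 0)).2 then k - 1
             else k
    let lid := (cells.getD j (0, 0)).1
    let merged := (cells.getD j (0, 0)).2 + (cells.getD (j + 1) (0, 0)).2
    -- cells[j:j+2] = [(lid, merged)]
    (cells.take j ++ [(lid, merged)] ++ cells.drop (j + 2), insortDesc q' (merged, lid))

def solution_alt (distance : Int) (rocks : List Int) (n : Int) : Int :=
  let pts := PySem.List.sorted rocks (fun x => x) false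
  let vals := (List.zip (0 :: pts) (pts ++ [distance])).map (fun ab => ab.2 - ab.1)
  let cells := PySem.List.enumerate vals 0
  let q := (PySem.List.enumerate vals 0).foldl (fun q kv => insortDesc q (kv.2, kv.1)) []
  let st := (PySem.List.pyRange 0 n 1).foldl (fun s _ => altStep s) (cells, q)
  match PySem.List.min? (st.1.map (fun c => c.2)) (fun x => x) with
  | none => 0      -- unreachable: cells is nonempty
  | some m => m

-- ===== PRECONDITION & SPEC =====
-- Pre_ excludes exactly the inputs where A raises IndexError: more removals than rocks.
def Pre_solution (distance : Int) (rocks : List Int) (n : Int) : Prop :=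
  n ≤ (rocks.length : Int)
instance (distance : Int) (rocks : List Int) (n : Int) : Decidable (Pre_solution distance rocks n) := by
  unfold Pre_solution; infer_instance

def pvWitness_solution : Int × List Int × Int := (25, ([2, 14, 11, 21, 17] : List Int), 2)

def Spec_solution (distance : Int) (rocks : List Int) (n : Int) (out : Int) : Prop := out = solution_alt distance rocks n
instance (distance : Int) (rocks : List Int) (n : Int) (out : Int) : Decidable (Spec_solution distance rocks n out) := by unfold Spec_solution; infer_instance

-- ===== CLAIM (what is proved, stated in full; the proofs are below) =====
def Claim_equal_solution : Prop := ∀ (distance : Int) (rocks : List Int) (n : Int), Dom_solution distance rocks n → Pre_solution distance rocks n → Spec_solution distance rocks n (solution distance rocks n)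

-- ===== LEMMAS AND PROOFS =====

-- proof-only abstractions ----------------------------------------------------

def gapsFrom (this : Int) : List Int → List Int
  | [] => []
  | m :: M => (m - this) :: gapsFrom m M

-- "merge the gaps j and j+1 of d" — the common shape both ports' merge steps reduce to
def spliceAt (j : Nat) (d : List Int) : List Int :=
  d.take j ++ [d.getD j 0 + d.getD (j + 1) 0] ++ d.drop (j + 2)

-- the position both programs merge at, given the first argmin i
def spliceJ (d : List Int) (i : Nat) : Nat :=
  if i = 0 then 0
  else if i = d.length - 1 ∨ d.getD (i - 1) 0 < d.getD (i + 1) 0 then i - 1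
  else i

-- lexicographic order on (value, id) pairs, as Python compares tuples
def lexLe (a b : Int × Int) : Prop := a.1 < b.1 ∨ (a.1 = b.1 ∧ a.2 ≤ b.2)

-- the queue is sorted descending
def SortedD (q : List (Int × Int)) : Prop := q.Pairwise (fun a b => lexLe b a)

-- cell ids are strictly increasing along the list
def IdsInc (cells : List (Int × Int)) : Prop := cells.Pairwise (fun a b => a.1 < b.1)

-- every live (value, id) event is in the queue
def LiveIn (cells q : List (Int × Int)) : Prop := ∀ c ∈ cells, (c.2, c.1) ∈ q

-- basic list facts -----------------------------------------------------------

theorem set_append_cons (u : List Int) (a v : Int) (w : List Int) :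
    (u ++ a :: w).set u.length v = u ++ v :: w := by
  rw [List.set_append]
  simp

theorem pySetD_neg_one_eq (xs : List Int) (v : Int) (h : xs ≠ []) :
    PySem.List.pySetD xs (-1) v = xs.set (xs.length - 1) v := by
  have h1 : 0 < xs.length := List.length_pos_of_ne_nil h
  simp [PySem.List.pySetD, PySem.List.pySet?, PySem.List.pyIdx?]
  rw [if_pos (show 1 ≤ xs.length by omega)]
  simp

theorem exists_split_two : ∀ (d : List Int) (k : Nat), k + 2 ≤ d.length →
    ∃ u a b w, d = u ++ a :: b :: w ∧ u.length = k := by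
  intro d
  induction d with
  | nil => intro k h; simp at h
  | cons y t ih =>
    intro k h
    cases k with
    | zero =>
      cases t with
      | nil => simp at h
      | cons b w => exact ⟨[], y, b, w, rfl, rfl⟩
    | succ k =>
      obtain ⟨u, a, b, w, hdec, hu⟩ := ih k (by simp at h; omega)
      exact ⟨y :: u, a, b, w, by rw [hdec]; rfl, by simp [hu]⟩

theorem getD_append_self (u : List Int) (x : Int) (r : List Int) :
    (u ++ x :: r).getD u.length 0 = x := by
  induction u with
  | nil => simp
  | cons y u ih => simpa using ih

theorem getD_append_self1 (u : List Int) (a x : Int) (r : List Int) :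
    (u ++ a :: x :: r).getD (u.length + 1) 0 = x := by
  have h := getD_append_self (u ++ [a]) x r
  simpa using h

theorem eraseIdx_append_cons (u : List Int) (x : Int) (r : List Int) :
    (u ++ x :: r).eraseIdx u.length = u ++ r := by
  induction u with
  | nil => simp
  | cons y u ih =>
    simp only [List.cons_append, List.length_cons, List.eraseIdx_cons_succ]
    rw [ih]

theorem spliceAt_decomp (u : List Int) (a b : Int) (w : List Int) :
    spliceAt u.length (u ++ a :: b :: w) = u ++ (a + b) :: w := by
  have htake : (u ++ a :: b :: w).take u.length = u := List.take_left
  have hdrop : (u ++ a :: b :: w).drop (u.length + 2) = w := by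
    rw [show u ++ a :: b :: w = (u ++ [a, b]) ++ w by simp,
      show u.length + 2 = (u ++ [a, b]).length by simp, List.drop_left]
  unfold spliceAt
  rw [htake, hdrop, getD_append_self, getD_append_self1]
  simp

theorem spliceJ_add_two_le (d : List Int) (i : Nat) (h2 : 2 ≤ d.length)
    (hi : i < d.length) : spliceJ d i + 2 ≤ d.length := by
  unfold spliceJ
  split_ifs with h0 h1
  · omega
  · omega
  · push_neg at h1
    omega

-- pairGt vs lexLe ------------------------------------------------------------

theorem pairGt_eq_false_iff (a b : Int × Int) : pairGt a b = false ↔ lexLe a b := by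
  rcases a with ⟨a1, a2⟩
  rcases b with ⟨b1, b2⟩
  simp only [pairGt, lexLe, Bool.or_eq_false_iff, Bool.and_eq_false_iff,
    decide_eq_false_iff_not, not_lt, beq_iff_eq, beq_eq_false_iff_ne]
  constructor
  · intro h; omega
  · intro h; omega

theorem pairGt_trans_le (a b item : Int × Int) (hle : lexLe b a)
    (h : pairGt b item = true) : pairGt a item = true := by
  simp only [pairGt, lexLe, Bool.or_eq_true, Bool.and_eq_true, decide_eq_true_eq,
    beq_iff_eq] at *
  omega

theorem pairGt_false_of_le (a b item : Int × Int) (hle : lexLe a b)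
    (h : pairGt b item = false) : pairGt a item = false := by
  simp only [pairGt, lexLe, Bool.or_eq_false_iff, Bool.and_eq_false_iff,
    decide_eq_false_iff_not, beq_iff_eq, beq_eq_false_iff_ne, not_lt] at *
  omega

theorem sortedD_getD_le (q : List (Int × Int)) (hs : SortedD q) (i j : Nat)
    (hij : i ≤ j) (hj : j < q.length) :
    lexLe (q.getD j (0, 0)) (q.getD i (0, 0)) := by
  rcases lt_or_eq_of_le hij with h | h
  · rw [List.getD_eq_getElem _ _ hj, List.getD_eq_getElem _ _ (lt_trans h hj)]
    exact (List.pairwise_iff_getElem.mp hs) i j _ hj h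
  · subst h; simp [lexLe]

theorem insortLoop_spec (q : List (Int × Int)) (item : Int × Int) (hs : SortedD q) :
    ∀ (fuel lo hi : Nat), hi - lo ≤ fuel → lo ≤ hi → hi ≤ q.length →
    (∀ m, m < lo → pairGt (q.getD m (0, 0)) item = true) →
    (∀ m, hi ≤ m → m < q.length → pairGt (q.getD m (0, 0)) item = false) →
    lo ≤ insortLoop q item lo hi ∧ insortLoop q item lo hi ≤ hi ∧
    (∀ m, m < insortLoop q item lo hi → pairGt (q.getD m (0, 0)) item = true) ∧
    (∀ m, insortLoop q item lo hi ≤ m → m < q.length → pairGt (q.getD m (0, 0)) item = false) := by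
  intro fuel
  induction fuel with
  | zero =>
    intro lo hi hf hlh hhl hpre hpost
    have : ¬ lo < hi := by omega
    rw [insortLoop, dif_neg this]
    exact ⟨le_refl _, hlh, hpre, by
      intro m hm hml
      exact hpost m (by omega) hml⟩
  | succ fuel ih =>
    intro lo hi hf hlh hhl hpre hpost
    by_cases h : lo < hi
    · rw [insortLoop, dif_pos h]
      simp only
      set mid := (lo + hi) / 2 with hmid
      have hmlo : lo ≤ mid := by omega
      have hmhi : mid < hi := by omega
      by_cases hg : pairGt (q.getD mid (0, 0)) item = true
      · rw [if_pos hg]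
        refine (ih (mid + 1) hi (by omega) (by omega) hhl ?_ hpost).imp (by omega) id
        intro m hm
        exact pairGt_trans_le _ _ item
          (sortedD_getD_le q hs m mid (by omega) (by omega)) hg
      · rw [if_neg hg]
        refine (ih lo mid (by omega) (by omega) (by omega) hpre ?_).imp id
          (fun h' => ⟨by omega, h'.2⟩)
        intro m hm hml
        exact pairGt_false_of_le _ _ item
          (sortedD_getD_le q hs mid m hm hml) (by simpa using hg)
    · rw [insortLoop, dif_neg h]
      exact ⟨le_refl _, hlh, hpre, fun m hm hml => hpost m (by omega) hml⟩

theorem lexLe_trans (a b c : Int × Int) (h1 : lexLe a b) (h2 : lexLe b c) : lexLe a c := by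
  simp only [lexLe] at *; omega

theorem insortDesc_eq (q : List (Int × Int)) (item : Int × Int) (hs : SortedD q) :
    insortDesc q item
      = q.take (insortLoop q item 0 q.length) ++ item :: q.drop (insortLoop q item 0 q.length) := by
  obtain ⟨-, hle, -, -⟩ := insortLoop_spec q item hs q.length 0 q.length (by omega) (by omega)
    (le_refl _) (by omega) (by omega)
  unfold insortDesc
  rw [PySem.List.insert_natCast q _ item hle]

theorem mem_insortDesc (q : List (Int × Int)) (item x : Int × Int) (hs : SortedD q) :
    x ∈ insortDesc q item ↔ x = item ∨ x ∈ q := by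
  rw [insortDesc_eq q item hs]
  have h := List.take_append_drop (insortLoop q item 0 q.length) q
  constructor
  · intro hx
    rcases List.mem_append.mp hx with hx | hx
    · exact Or.inr (by rw [← h]; exact List.mem_append.mpr (Or.inl hx))
    · rcases List.mem_cons.mp hx with hx | hx
      · exact Or.inl hx
      · exact Or.inr (by rw [← h]; exact List.mem_append.mpr (Or.inr hx))
  · intro hx
    rcases hx with hx | hx
    · exact List.mem_append.mpr (Or.inr (List.mem_cons.mpr (Or.inl hx)))
    · rw [← h] at hx
      rcases List.mem_append.mp hx with hx | hx
      · exact List.mem_append.mpr (Or.inl hx)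
      · exact List.mem_append.mpr (Or.inr (List.mem_cons.mpr (Or.inr hx)))

theorem mem_take_getD (q : List (Int × Int)) (r : Nat) (a : Int × Int) (h : a ∈ q.take r) :
    ∃ mIdx, mIdx < r ∧ mIdx < q.length ∧ q.getD mIdx (0,0) = a := by
  obtain ⟨i, hi, hq⟩ := List.getElem_of_mem h
  refine ⟨i, ?_, ?_, ?_⟩
  · simp at hi; omega
  · simp at hi; omega
  · rw [List.getD_eq_getElem _ _ (by simp at hi; omega)]
    rw [← hq, List.getElem_take]

theorem mem_drop_getD (q : List (Int × Int)) (r : Nat) (a : Int × Int) (h : a ∈ q.drop r) :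
    ∃ mIdx, r ≤ mIdx ∧ mIdx < q.length ∧ q.getD mIdx (0,0) = a := by
  obtain ⟨i, hi, hq⟩ := List.getElem_of_mem h
  refine ⟨r + i, by omega, ?_, ?_⟩
  · simp at hi; omega
  · rw [List.getD_eq_getElem _ _ (by simp at hi; omega)]
    rw [← hq, List.getElem_drop]

theorem sortedD_insortDesc (q : List (Int × Int)) (item : Int × Int) (hs : SortedD q) :
    SortedD (insortDesc q item) := by
  obtain ⟨-, hle, hpre, hpost⟩ := insortLoop_spec q item hs q.length 0 q.length (by omega)
    (by omega) (le_refl _) (by omega) (by omega)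
  rw [insortDesc_eq q item hs]
  set r := insortLoop q item 0 q.length with hr
  unfold SortedD
  rw [List.pairwise_append]
  refine ⟨hs.take, ?_, ?_⟩
  · rw [List.pairwise_cons]
    refine ⟨?_, hs.drop⟩
    intro b hb
    obtain ⟨mi, hmi1, hmi2, hmi3⟩ := mem_drop_getD q r b hb
    rw [← hmi3]
    exact (pairGt_eq_false_iff _ _).mp (hpost mi hmi1 hmi2)
  · intro a ha b hb
    obtain ⟨mi, hmi1, hmi2, hmi3⟩ := mem_take_getD q r a ha
    have hgt : pairGt a item = true := by rw [← hmi3]; exact hpre mi hmi1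
    have hia : lexLe item a := by
      simp only [pairGt, lexLe, Bool.or_eq_true, Bool.and_eq_true, decide_eq_true_eq,
        beq_iff_eq] at hgt ⊢
      omega
    rcases List.mem_cons.mp hb with hb | hb
    · subst hb; exact hia
    · obtain ⟨mj, hmj1, hmj2, hmj3⟩ := mem_drop_getD q r b hb
      have : lexLe b item := by
        rw [← hmj3]; exact (pairGt_eq_false_iff _ _).mp (hpost mj hmj1 hmj2)
      exact lexLe_trans _ _ _ this hia



-- ids in index form
theorem idsInc_getD_lt (cells : List (Int × Int)) (hinc : IdsInc cells) (i j : Nat)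
    (hij : i < j) (hj : j < cells.length) :
    (cells.getD i (0, 0)).1 < (cells.getD j (0, 0)).1 := by
  rw [List.getD_eq_getElem _ _ hj, List.getD_eq_getElem _ _ (lt_trans hij hj)]
  exact (List.pairwise_iff_getElem.mp hinc) i j _ hj hij

theorem findLoop_spec (cells : List (Int × Int)) (i : Int) (hinc : IdsInc cells) :
    ∀ (fuel lo hi : Nat), hi - lo ≤ fuel → lo ≤ hi → hi ≤ cells.length →
    (∀ m, m < lo → (cells.getD m (0, 0)).1 < i) →
    (∀ m, hi ≤ m → m < cells.length → ¬ (cells.getD m (0, 0)).1 < i) →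
    lo ≤ findLoop cells i lo hi ∧ findLoop cells i lo hi ≤ hi ∧
    (∀ m, m < findLoop cells i lo hi → (cells.getD m (0, 0)).1 < i) ∧
    (∀ m, findLoop cells i lo hi ≤ m → m < cells.length → ¬ (cells.getD m (0, 0)).1 < i) := by
  intro fuel
  induction fuel with
  | zero =>
    intro lo hi hf hlh hhl hpre hpost
    have : ¬ lo < hi := by omega
    rw [findLoop, dif_neg this]
    exact ⟨le_refl _, hlh, hpre, fun m hm hml => hpost m (by omega) hml⟩
  | succ fuel ih =>
    intro lo hi hf hlh hhl hpre hpost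
    by_cases h : lo < hi
    · rw [findLoop, dif_pos h]
      simp only
      set mid := (lo + hi) / 2 with hmid
      have hmlo : lo ≤ mid := by omega
      have hmhi : mid < hi := by omega
      by_cases hg : (cells.getD mid (0, 0)).1 < i
      · rw [if_pos hg]
        refine (ih (mid + 1) hi (by omega) (by omega) hhl ?_ hpost).imp (by omega) id
        intro m hm
        rcases lt_or_eq_of_le (show m ≤ mid by omega) with hmm | hmm
        · exact lt_trans (idsInc_getD_lt cells hinc m mid hmm (by omega)) hg
        · subst hmm; exact hg
      · rw [if_neg hg]
        refine (ih lo mid (by omega) (by omega) (by omega) hpre ?_).imp id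
          (fun h' => ⟨by omega, h'.2⟩)
        intro m hm hml hcon
        rcases lt_or_eq_of_le hm with hmm | hmm
        · exact hg (lt_trans (idsInc_getD_lt cells hinc mid m hmm hml) hcon)
        · rw [hmm] at hg; exact hg hcon
    · rw [findLoop, dif_neg h]
      exact ⟨le_refl _, hlh, hpre, fun m hm hml => hpost m (by omega) hml⟩

theorem findId_of_mem (cells : List (Int × Int)) (hinc : IdsInc cells) (k : Nat)
    (hk : k < cells.length) :
    findId cells (cells.getD k (0, 0)).1 = some k := by
  set i := (cells.getD k (0, 0)).1 with hi
  obtain ⟨-, -, hpre, hpost⟩ := findLoop_spec cells i hinc cells.length 0 cells.length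
    (by omega) (by omega) (le_refl _) (by omega) (by omega)
  set r := findLoop cells i 0 cells.length with hr
  have hrk : r = k := by
    by_contra hne
    rcases lt_or_gt_of_ne hne with hlt | hgt
    · exact (hpost r (le_refl _) (by omega)) (idsInc_getD_lt cells hinc r k hlt hk)
    · exact absurd (hpre k hgt) (lt_irrefl i)
  have hcond : ((cells.getD k (0, 0)).1 == i) = true := by simp [hi]
  unfold findId
  rw [← hr, hrk, dif_pos hk, hcond]
  simp

theorem findId_getD (cells : List (Int × Int)) (i : Int) (k : Nat)
    (h : findId cells i = some k) : k < cells.length ∧ (cells.getD k (0, 0)).1 = i := by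
  unfold findId at h
  by_cases hlt : findLoop cells i 0 cells.length < cells.length
  · rw [dif_pos hlt] at h
    by_cases heq : (cells.getD (findLoop cells i 0 cells.length) (0, 0)).1 == i
    · rw [if_pos heq] at h
      obtain rfl : findLoop cells i 0 cells.length = k := by injection h
      exact ⟨hlt, by simpa using heq⟩
    · rw [if_neg heq] at h; cases h
  · rw [dif_neg hlt] at h; cases h

-- the last element of a descending-sorted queue is lexicographically minimal
theorem sortedD_getLast_min (q : List (Int × Int)) (vi : Int × Int) (hs : SortedD q)
    (h : q.getLast? = some vi) : ∀ x ∈ q, lexLe vi x := by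
  intro x hx
  obtain ⟨q', rfl⟩ : ∃ q', q = q' ++ [vi] := by
    refine ⟨q.dropLast, ?_⟩
    conv_lhs => rw [← List.dropLast_append_getLast? vi h]
  rcases List.mem_append.mp hx with hx | hx
  · exact (List.pairwise_append.mp hs).2.2 x hx vi (by simp)
  · simp at hx; subst hx; simp [lexLe]

theorem getD_eq_getElem_pair (cells : List (Int × Int)) (k : Nat) (hk : k < cells.length) :
    cells.getD k (0, 0) = cells[k] := List.getD_eq_getElem _ _ hk

-- liveness test in popLoop decides membership of (id, value) in cells
theorem live_iff (cells : List (Int × Int)) (hinc : IdsInc cells) (vi : Int × Int) :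
    (∃ k, findId cells vi.2 = some k ∧ ((cells.getD k (0, 0)).2 == vi.1) = true)
      ↔ (vi.2, vi.1) ∈ cells := by
  constructor
  · rintro ⟨k, hk, hv⟩
    obtain ⟨hklen, hid⟩ := findId_getD cells vi.2 k hk
    have : cells.getD k (0, 0) = (vi.2, vi.1) := by
      rcases hcell : cells.getD k (0, 0) with ⟨a, b⟩
      rw [hcell] at hid hv
      simp at hid hv
      simp [hid, hv]
    rw [getD_eq_getElem_pair cells k hklen] at this
    rw [← this]
    exact List.getElem_mem hklen
  · intro hmem
    obtain ⟨k, hklen, hcell⟩ := List.getElem_of_mem hmem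
    refine ⟨k, ?_, ?_⟩
    · have := findId_of_mem cells hinc k hklen
      rw [getD_eq_getElem_pair cells k hklen, hcell] at this
      exact this
    · rw [getD_eq_getElem_pair cells k hklen, hcell]
      simp

theorem popLoop_last (cells q : List (Int × Int)) (vi : Int × Int)
    (h : q.getLast? = some vi) :
    popLoop cells q = match findId cells vi.2 with
      | some k => if (cells.getD k (0, 0)).2 == vi.1 then some (vi, k, q.dropLast)
                  else popLoop cells q.dropLast
      | none => popLoop cells q.dropLast := by
  rw [popLoop]
  split
  next hnone => rw [h] at hnone; cases hnone
  next vi' heq => rw [h] at heq; injection heq with heq; subst heq; rfl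

theorem popLoop_spec (cells : List (Int × Int)) (m : Int) (k0 : Nat)
    (hm : PySem.List.min? (cells.map Prod.snd) (fun x => x) = some m)
    (hk0 : PySem.List.index? (cells.map Prod.snd) m = some k0)
    (hinc : IdsInc cells) :
    ∀ (fuel : Nat) (q : List (Int × Int)), q.length ≤ fuel → SortedD q → LiveIn cells q →
    ∃ q', popLoop cells q = some ((m, (cells.getD k0 (0, 0)).1), k0, q') ∧ SortedD q' ∧
      (∀ c ∈ cells, (c.2, c.1) ≠ (m, (cells.getD k0 (0, 0)).1) → (c.2, c.1) ∈ q') := by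
  obtain ⟨hk0len, hk0val, hk0first⟩ := PySem.List.getElem_of_index?_eq_some hk0
  have hk0len' : k0 < cells.length := by simpa using hk0len
  have hmin : ∀ y ∈ cells.map Prod.snd, m ≤ y := by
    intro y hy
    simpa using PySem.List.min?_isMin hm y hy
  have hcellk0 : cells[k0].2 = m := by
    have := hk0val
    rw [List.getElem_map] at this
    exact this
  intro fuel
  induction fuel with
  | zero =>
    intro q hq hs hl
    obtain rfl : q = [] := List.eq_nil_of_length_eq_zero (by omega)
    exact absurd (hl cells[k0] (List.getElem_mem hk0len')) (by simp)
  | succ fuel ih =>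
    intro q hq hs hl
    match hlast : q.getLast? with
    | none =>
      obtain rfl : q = [] := List.getLast?_eq_none_iff.mp hlast
      exact absurd (hl cells[k0] (List.getElem_mem hk0len')) (by simp)
    | some vi =>
      have hvimin : ∀ x ∈ q, lexLe vi x := sortedD_getLast_min q vi hs hlast
      have hsd : SortedD q.dropLast := hs.sublist (List.dropLast_sublist q)
      have hqlen : q.dropLast.length ≤ fuel := by
        have : 0 < q.length := List.length_pos_of_ne_nil (by rintro rfl; simp at hlast)
        simp only [List.length_dropLast]; omega
      have hsplit : q = q.dropLast ++ [vi] := by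
        conv_lhs => rw [← List.dropLast_append_getLast? vi hlast]
      by_cases hlive : (vi.2, vi.1) ∈ cells
      · -- the popped entry is live: it is exactly (m, id of the first argmin)
        obtain ⟨kk, hkk, hcellkk⟩ := List.getElem_of_mem hlive
        have hvi1 : vi.1 = m := by
          have h1 : m ≤ vi.1 := by
            apply hmin
            rw [List.mem_map]
            exact ⟨(vi.2, vi.1), hlive, rfl⟩
          have h2 : lexLe vi (cells[k0].2, cells[k0].1) := by
            apply hvimin
            exact hl cells[k0] (List.getElem_mem hk0len')
          simp only [lexLe] at h2
          rw [hcellk0] at h2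
          omega
        have hkkk0 : kk = k0 := by
          by_contra hne
          rcases lt_or_gt_of_ne hne with hlt | hgt
          · -- kk < k0 contradicts k0 being the first index of m
            apply hk0first kk (by simpa using hlt)
            rw [List.getElem_map, hcellkk, hvi1]
          · -- k0 < kk: the live pair at k0 would be lexicographically smaller
            have hid : cells[k0].1 < cells[kk].1 :=
              (List.pairwise_iff_getElem.mp hinc) k0 kk hk0len' hkk hgt
            have h2 : lexLe vi (cells[k0].2, cells[k0].1) := by
              apply hvimin
              exact hl cells[k0] (List.getElem_mem hk0len')
            simp only [lexLe] at h2
            rw [hcellkk] at hid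
            rw [hcellk0] at h2
            simp only at hid h2
            omega
        subst hkkk0
        have hvi2 : vi.2 = (cells.getD kk (0, 0)).1 := by
          rw [getD_eq_getElem_pair cells kk hkk, hcellkk]
        have hvieq : vi = (m, (cells.getD kk (0, 0)).1) := by
          rw [← hvi1, ← hvi2]
        -- the test succeeds
        obtain ⟨k, hfind, htest⟩ := (live_iff cells hinc vi).mpr hlive
        have heq : popLoop cells q = some (vi, k, q.dropLast) := by
          rw [popLoop_last cells q vi hlast, hfind]
          simp only []
          rw [if_pos htest]
        have hkk' : k = kk := by
          obtain ⟨hklen, hid⟩ := findId_getD cells vi.2 k hfind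
          by_contra hne
          rcases lt_or_gt_of_ne hne with hlt | hgt
          · have := idsInc_getD_lt cells hinc k kk hlt hkk
            rw [hid, hvi2] at this
            exact lt_irrefl _ this
          · have := idsInc_getD_lt cells hinc kk k hgt hklen
            rw [hid, hvi2] at this
            exact lt_irrefl _ this
        refine ⟨q.dropLast, ?_, hsd, ?_⟩
        · rw [heq, hkk', hvieq]
        · intro c hc hcne
          have hcq : (c.2, c.1) ∈ q := hl c hc
          rw [hsplit] at hcq
          rcases List.mem_append.mp hcq with h | h
          · exact h
          · simp at h
            exact absurd (by rw [h, hvieq]) hcne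
      · -- stale entry: the test fails, recurse on q.dropLast
        have hld : LiveIn cells q.dropLast := by
          intro c hc
          have hcq : (c.2, c.1) ∈ q := hl c hc
          rw [hsplit] at hcq
          rcases List.mem_append.mp hcq with h | h
          · exact h
          · simp at h
            exact absurd (by rw [← h]; simpa using hc) hlive
        have hnotest : ¬ ∃ k, findId cells vi.2 = some k ∧
            ((cells.getD k (0, 0)).2 == vi.1) = true := by
          rw [live_iff cells hinc vi]; exact hlive
        have heq : popLoop cells q = popLoop cells q.dropLast := by
          rw [popLoop_last cells q vi hlast]
          match hfind : findId cells vi.2 with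
          | none => rfl
          | some k =>
            have hfalse : ((cells.getD k (0, 0)).2 == vi.1) = false := by
              by_contra hcon
              exact hnotest ⟨k, hfind, by simpa using hcon⟩
            simp only []
            rw [if_neg (by simp only [hfalse]; exact Bool.false_ne_true)]
        rw [heq]
        exact ih q.dropLast hqlen hsd hld

theorem getD_map_snd (cells : List (Int × Int)) (t : Nat) (ht : t < cells.length) :
    (cells.map Prod.snd).getD t 0 = (cells.getD t (0, 0)).2 := by
  rw [List.getD_eq_getElem _ _ (by simpa using ht), List.getD_eq_getElem _ _ ht,
    List.getElem_map]

theorem exists_split_two_p {α : Type} : ∀ (d : List α) (k : Nat), k + 2 ≤ d.length →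
    ∃ u a b w, d = u ++ a :: b :: w ∧ u.length = k := by
  intro d
  induction d with
  | nil => intro k h; simp at h
  | cons y t ih =>
    intro k h
    cases k with
    | zero =>
      cases t with
      | nil => simp at h
      | cons b w => exact ⟨[], y, b, w, rfl, rfl⟩
    | succ k =>
      obtain ⟨u, a, b, w, hdec, hu⟩ := ih k (by simp at h; omega)
      exact ⟨y :: u, a, b, w, by rw [hdec]; rfl, by simp [hu]⟩

theorem getD_append_self_p {α : Type} : ∀ (u : List α) (x : α) (r : List α) (d0 : α),
    (u ++ x :: r).getD u.length d0 = x := by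
  intro u
  induction u with
  | nil => intro x r d0; simp
  | cons y u ih => intro x r d0; simpa using ih x r d0

theorem getD_append_self1_p {α : Type} (u : List α) (a x : α) (r : List α) (d0 : α) :
    (u ++ a :: x :: r).getD (u.length + 1) d0 = x := by
  have h := getD_append_self_p (u ++ [a]) x r d0
  simpa using h

theorem drop_append_cons2 {α : Type} (u : List α) (a b : α) (w : List α) :
    (u ++ a :: b :: w).drop (u.length + 2) = w := by
  rw [show u ++ a :: b :: w = (u ++ [a, b]) ++ w by simp,
    show u.length + 2 = (u ++ [a, b]).length by simp, List.drop_left]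

theorem idsInc_splice (u : List (Int × Int)) (a b : Int × Int) (w : List (Int × Int)) (x : Int)
    (h : IdsInc (u ++ a :: b :: w)) : IdsInc (u ++ (a.1, x) :: w) := by
  unfold IdsInc at h ⊢
  rw [List.pairwise_append] at h ⊢
  obtain ⟨hu, habw, hcross⟩ := h
  rw [List.pairwise_cons] at habw
  obtain ⟨ha, hbw⟩ := habw
  rw [List.pairwise_cons] at hbw
  obtain ⟨hb, hw⟩ := hbw
  refine ⟨hu, ?_, ?_⟩
  · rw [List.pairwise_cons]
    exact ⟨fun c hc => ha c (List.mem_cons_of_mem _ hc), hw⟩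
  · intro p hp c hc
    rcases List.mem_cons.mp hc with hc | hc
    · subst hc; exact hcross p hp a (by simp)
    · exact hcross p hp c (by simp [hc])

theorem altStep_eq (cells q : List (Int × Int)) (m : Int) (k0 : Nat)
    (h2 : 2 ≤ cells.length)
    (hm : PySem.List.min? (cells.map Prod.snd) (fun x => x) = some m)
    (hk0 : PySem.List.index? (cells.map Prod.snd) m = some k0)
    (hinc : IdsInc cells) (hs : SortedD q) (hl : LiveIn cells q) :
    (altStep (cells, q)).1.map Prod.snd
        = spliceAt (spliceJ (cells.map Prod.snd) k0) (cells.map Prod.snd)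
    ∧ IdsInc (altStep (cells, q)).1 ∧ SortedD (altStep (cells, q)).2
    ∧ LiveIn (altStep (cells, q)).1 (altStep (cells, q)).2
    ∧ (altStep (cells, q)).1.length + 1 = cells.length := by
  obtain ⟨hk0len, hk0val, -⟩ := PySem.List.getElem_of_index?_eq_some hk0
  have hk0len' : k0 < cells.length := by simpa using hk0len
  obtain ⟨q', hpop, hsq', hq'⟩ :=
    popLoop_spec cells m k0 hm hk0 hinc q.length q (le_refl _) hs hl
  have hstep : altStep (cells, q) =
      (cells.take (spliceJ (cells.map Prod.snd) k0)
        ++ [((cells.getD (spliceJ (cells.map Prod.snd) k0) (0, 0)).1,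
             (cells.getD (spliceJ (cells.map Prod.snd) k0) (0, 0)).2
               + (cells.getD (spliceJ (cells.map Prod.snd) k0 + 1) (0, 0)).2)]
        ++ cells.drop (spliceJ (cells.map Prod.snd) k0 + 2),
       insortDesc q'
         ((cells.getD (spliceJ (cells.map Prod.snd) k0) (0, 0)).2
            + (cells.getD (spliceJ (cells.map Prod.snd) k0 + 1) (0, 0)).2,
          (cells.getD (spliceJ (cells.map Prod.snd) k0) (0, 0)).1)) := by
    have hj : (if k0 = 0 then 0
        else if k0 = cells.length - 1
            ∨ (cells.getD (k0 - 1) (0, 0)).2 < (cells.getD (k0 + 1) (0, 0)).2 then k0 - 1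
        else k0) = spliceJ (cells.map Prod.snd) k0 := by
      unfold spliceJ
      rw [List.length_map]
      by_cases h0 : k0 = 0
      · rw [if_pos h0, if_pos h0]
      · rw [if_neg h0, if_neg h0]
        by_cases hlast : k0 = cells.length - 1
        · rw [if_pos (Or.inl hlast), if_pos (Or.inl hlast)]
        · have hk1 : k0 + 1 < cells.length := by omega
          have hkm1 : k0 - 1 < cells.length := by omega
          rw [getD_map_snd cells (k0 - 1) hkm1, getD_map_snd cells (k0 + 1) hk1]
    simp only [altStep, hpop]
    rw [hj]
  have hd2 : 2 ≤ (cells.map Prod.snd).length := by simpa using h2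
  have hjlt : spliceJ (cells.map Prod.snd) k0 + 2 ≤ cells.length := by
    have := spliceJ_add_two_le (cells.map Prod.snd) k0 hd2 (by simpa using hk0len')
    simpa using this
  set j := spliceJ (cells.map Prod.snd) k0 with hjdef
  have hk0j : k0 = j ∨ k0 = j + 1 := by
    rw [hjdef]
    unfold spliceJ
    split_ifs with h0 hor
    · omega
    · rw [List.length_map] at hor
      omega
    · omega
  obtain ⟨u, a, b, w, hdec, hu⟩ := exists_split_two_p cells j hjlt
  have htake : cells.take j = u := by rw [hdec, ← hu]; exact List.take_left
  have hdrop : cells.drop (j + 2) = w := by rw [hdec, ← hu]; exact drop_append_cons2 u a b w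
  have hga : cells.getD j (0, 0) = a := by rw [hdec, ← hu]; exact getD_append_self_p u a (b :: w) (0, 0)
  have hgb : cells.getD (j + 1) (0, 0) = b := by rw [hdec, ← hu]; exact getD_append_self1_p u a b w (0, 0)
  rw [hstep]
  have hcells' : (cells.take j ++ [((cells.getD j (0, 0)).1,
        (cells.getD j (0, 0)).2 + (cells.getD (j + 1) (0, 0)).2)] ++ cells.drop (j + 2))
      = u ++ (a.1, a.2 + b.2) :: w := by
    rw [htake, hdrop, hga, hgb]
    simp
  have hsplice : (u ++ (a.1, a.2 + b.2) :: w).map Prod.snd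
      = spliceAt j (cells.map Prod.snd) := by
    have hdl : cells.map Prod.snd = u.map Prod.snd ++ a.2 :: b.2 :: w.map Prod.snd := by
      rw [hdec]; simp
    have hul : (u.map Prod.snd).length = j := by simpa using hu
    rw [hdl, ← hul, spliceAt_decomp]
    simp
  have hinc' : IdsInc (u ++ (a.1, a.2 + b.2) :: w) := by
    apply idsInc_splice u a b w _
    rw [← hdec]; exact hinc
  -- distinct ids for the LiveIn argument
  have hidu : ∀ c ∈ u, c.1 < a.1 ∧ c.1 < b.1 := by
    intro c hc
    have h' := hinc
    rw [hdec] at h'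
    unfold IdsInc at h'
    rw [List.pairwise_append] at h'
    exact ⟨h'.2.2 c hc a (by simp), h'.2.2 c hc b (by simp)⟩
  have hidw : ∀ c ∈ w, a.1 < c.1 ∧ b.1 < c.1 := by
    intro c hc
    have h' := hinc
    rw [hdec] at h'
    unfold IdsInc at h'
    rw [List.pairwise_append] at h'
    have h1 := h'.2.1
    rw [List.pairwise_cons] at h1
    obtain ⟨ha, h1⟩ := h1
    rw [List.pairwise_cons] at h1
    exact ⟨ha c (by simp [hc]), h1.1 c hc⟩
  have hi0 : (cells.getD k0 (0, 0)).1 = a.1 ∨ (cells.getD k0 (0, 0)).1 = b.1 := by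
    rcases hk0j with h | h
    · left; rw [h, hga]
    · right; rw [h, hgb]
  constructor
  · simp only [hcells']
    exact hsplice
  refine ⟨?_, ?_, ?_, ?_⟩
  · simp only [hcells']
    exact hinc'
  · simp only
    exact sortedD_insortDesc q' _ hsq'
  · simp only [hcells']
    intro c hc
    rw [mem_insortDesc _ _ _ hsq']
    rcases List.mem_append.mp hc with hcu | hcw
    · -- c in the untouched prefix
      have hne : (c.2, c.1) ≠ (m, (cells.getD k0 (0, 0)).1) := by
        intro hcon
        have hc1 : c.1 = (cells.getD k0 (0, 0)).1 := by
          have := congrArg Prod.snd hcon; simpa using this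
        obtain ⟨hlt1, hlt2⟩ := hidu c hcu
        rcases hi0 with h | h
        · rw [h] at hc1; omega
        · rw [h] at hc1; omega
      right
      apply hq' c _ hne
      rw [hdec]
      exact List.mem_append.mpr (Or.inl hcu)
    · rcases List.mem_cons.mp hcw with hcn | hcw
      · -- the merged cell
        left
        rw [hcn, hga, hgb]
      · have hne : (c.2, c.1) ≠ (m, (cells.getD k0 (0, 0)).1) := by
          intro hcon
          have hc1 : c.1 = (cells.getD k0 (0, 0)).1 := by
            have := congrArg Prod.snd hcon; simpa using this
          obtain ⟨hgt1, hgt2⟩ := hidw c hcw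
          rcases hi0 with h | h
          · rw [h] at hc1; omega
          · rw [h] at hc1; omega
        right
        apply hq' c _ hne
        rw [hdec]
        exact List.mem_append.mpr (Or.inr (by simp [hcw]))
  · simp only [hcells']
    have := congrArg List.length hdec
    simp at this ⊢
    omega

-- A's loop body is the splice at spliceJ -------------------------------------

theorem solStep_eq (d : List Int) (m : Int) (i : Nat) (h2 : 2 ≤ d.length)
    (hm : PySem.List.min? d (fun x => x) = some m)
    (hi : PySem.List.index? d m = some i) :
    solStep d = spliceAt (spliceJ d i) d := by
  obtain ⟨hilt, -, -⟩ := PySem.List.getElem_of_index?_eq_some hi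
  simp only [solStep, hm, hi]
  by_cases h0 : i = 0
  · subst h0
    rw [if_pos rfl]
    obtain ⟨u, a, b, w, rfl, hu⟩ := exists_split_two d 0 h2
    obtain rfl : u = [] := List.eq_nil_of_length_eq_zero hu
    simp only [List.nil_append, PySem.List.pop?_zero_cons, PySem.List.pyGetD_zero_cons]
    simp [PySem.List.pySetD_of_nonneg, spliceJ, spliceAt]
    rw [Int.add_comm]
  · by_cases hlast : i = d.length - 1
    · rw [if_neg h0, if_pos hlast]
      have hk : (i - 1) + 2 ≤ d.length := by omega
      obtain ⟨u, a, b, w, hdec, hu⟩ := exists_split_two d (i - 1) hk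
      have hw : w = [] := by
        have hlen := congrArg List.length hdec
        simp at hlen
        have : w.length = 0 := by omega
        exact List.eq_nil_of_length_eq_zero this
      subst hw
      subst hdec
      have hassoc : u ++ a :: b :: ([] : List Int) = (u ++ [a]) ++ [b] := by simp
      conv_lhs => rw [hassoc]
      simp only [PySem.List.pop?_last, PySem.List.pyGetD_neg_one_append_singleton]
      rw [pySetD_neg_one_eq _ _ (by simp)]
      rw [show (u ++ [a]).length - 1 = u.length by simp]
      rw [set_append_cons]
      unfold spliceJ
      rw [if_neg h0, if_pos (Or.inl hlast), ← hu, spliceAt_decomp]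
    · rw [if_neg h0, if_neg hlast]
      have hi1 : 1 ≤ i := Nat.one_le_iff_ne_zero.mpr h0
      have hilen : i + 1 < d.length := by omega
      have hgm1 : PySem.List.pyGetD d ((i : Int) - 1) 0 = d.getD (i - 1) 0 := by
        rw [show ((i : Int) - 1) = (((i - 1 : Nat) : Int)) by omega, PySem.List.pyGetD_natCast]
      have hgp1 : PySem.List.pyGetD d ((i : Int) + 1) 0 = d.getD (i + 1) 0 := by
        rw [show ((i : Int) + 1) = (((i + 1 : Nat) : Int)) by push_cast; ring,
          PySem.List.pyGetD_natCast]
      rw [hgm1, hgp1]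
      unfold spliceJ
      rw [if_neg h0]
      by_cases hcond : d.getD (i - 1) 0 < d.getD (i + 1) 0
      · rw [if_pos hcond, if_pos (Or.inr hcond)]
        have hk : (i - 1) + 2 ≤ d.length := by omega
        obtain ⟨u, a, x, w, rfl, hu⟩ := exists_split_two d (i - 1) hk
        have hieq : i = u.length + 1 := by omega
        subst hieq
        simp only [PySem.List.pop?_natCast _ _ hilt]
        have hx : (u ++ a :: x :: w)[u.length + 1]'hilt = x := by
          rw [List.getElem_append_right (by omega)]
          simp
        rw [hx]
        have herase : (u ++ a :: x :: w).eraseIdx (u.length + 1) = u ++ a :: w := by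
          rw [show u ++ a :: x :: w = (u ++ [a]) ++ x :: w by simp,
            show u.length + 1 = (u ++ [a]).length by simp, eraseIdx_append_cons]
          simp
        rw [herase]
        rw [show (((u.length + 1 : Nat) : Int) - 1) = ((u.length : Nat) : Int) by push_cast; ring]
        rw [PySem.List.pyGetD_natCast, PySem.List.pySetD_natCast, getD_append_self,
          set_append_cons]
        rw [show u.length + 1 - 1 = u.length by omega, spliceAt_decomp]
      · rw [if_neg hcond, if_neg (fun h => h.elim hlast hcond)]
        have hk : i + 2 ≤ d.length := by omega
        obtain ⟨u, x, c, w, rfl, hu⟩ := exists_split_two d i hk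
        subst hu
        simp only [PySem.List.pop?_natCast _ _ hilt]
        have hx : (u ++ x :: c :: w)[u.length]'hilt = x := by
          rw [List.getElem_append_right (by omega)]
          simp
        rw [hx, eraseIdx_append_cons]
        rw [PySem.List.pyGetD_natCast, PySem.List.pySetD_natCast, getD_append_self,
          set_append_cons, spliceAt_decomp]
        rw [Int.add_comm x c]

theorem iter_eq : ∀ (t : Nat) (cells q : List (Int × Int)), t < cells.length →
    IdsInc cells → SortedD q → LiveIn cells q →
    (altStep^[t] (cells, q)).1.map Prod.snd = solStep^[t] (cells.map Prod.snd) := by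
  intro t
  induction t with
  | zero => intro cells q _ _ _ _; simp
  | succ t ih =>
    intro cells q ht hinc hs hl
    have h2 : 2 ≤ cells.length := by omega
    obtain ⟨m, hm⟩ : ∃ m, PySem.List.min? (cells.map Prod.snd) (fun x => x) = some m := by
      cases hmm : PySem.List.min? (cells.map Prod.snd) (fun x => x) with
      | none =>
        have hc : cells = [] := by
          simpa using (PySem.List.min?_eq_none_iff _ _).mp hmm
        rw [hc] at h2
        simp at h2
      | some m => exact ⟨m, rfl⟩
    obtain ⟨k0, hk0⟩ : ∃ k0, PySem.List.index? (cells.map Prod.snd) m = some k0 := by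
      cases hkk : PySem.List.index? (cells.map Prod.snd) m with
      | none =>
        exact absurd (PySem.List.min?_mem hm)
          ((PySem.List.index?_eq_none_iff _ _).mp hkk)
      | some k0 => exact ⟨k0, rfl⟩
    obtain ⟨hsplice, hinc', hs', hl', hlen'⟩ :=
      altStep_eq cells q m k0 h2 hm hk0 hinc hs hl
    rw [Function.iterate_succ_apply, Function.iterate_succ_apply]
    have hstep : solStep (cells.map Prod.snd) = (altStep (cells, q)).1.map Prod.snd := by
      rw [hsplice]
      obtain ⟨hk0len, -, -⟩ := PySem.List.getElem_of_index?_eq_some hk0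
      exact solStep_eq (cells.map Prod.snd) m k0 (by simpa using h2) hm hk0
    rw [hstep]
    have : altStep (cells, q) = ((altStep (cells, q)).1, (altStep (cells, q)).2) := rfl
    rw [this]
    exact ih (altStep (cells, q)).1 (altStep (cells, q)).2 (by omega) hinc' hs' hl'

-- initial states -------------------------------------------------------------

theorem enumerate_fst_lt {α : Type} : ∀ (xs : List α) (s : Int) (p : Int × α),
    p ∈ PySem.List.enumerate xs s → s ≤ p.1 := by
  intro xs
  induction xs with
  | nil => intro s p h; simp [PySem.List.enumerate] at h
  | cons x xs ih =>
    intro s p h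
    rw [PySem.List.enumerate_cons] at h
    rcases List.mem_cons.mp h with h | h
    · subst h; simp
    · have := ih (s + 1) p h; omega

theorem idsInc_enumerate {α : Type} : ∀ (xs : List α) (s : Int),
    (PySem.List.enumerate xs s).Pairwise (fun a b => a.1 < b.1) := by
  intro xs
  induction xs with
  | nil => intro s; simp [PySem.List.enumerate]
  | cons x xs ih =>
    intro s
    rw [PySem.List.enumerate_cons, List.pairwise_cons]
    refine ⟨?_, ih (s + 1)⟩
    intro p hp
    have := enumerate_fst_lt xs (s + 1) p hp
    simp
    omega

theorem foldl_insort_inv (l : List (Int × Int)) : ∀ (acc : List (Int × Int)), SortedD acc →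
    SortedD (l.foldl (fun q kv => insortDesc q (kv.2, kv.1)) acc) ∧
    ∀ x : Int × Int, (x ∈ acc ∨ ∃ kv ∈ l, x = (kv.2, kv.1)) →
      x ∈ l.foldl (fun q kv => insortDesc q (kv.2, kv.1)) acc := by
  induction l with
  | nil =>
    intro acc hacc
    refine ⟨hacc, ?_⟩
    rintro x (hx | ⟨kv, hkv, -⟩)
    · simpa using hx
    · simp at hkv
  | cons kv l ih =>
    intro acc hacc
    obtain ⟨h1, h2⟩ := ih (insortDesc acc (kv.2, kv.1)) (sortedD_insortDesc acc _ hacc)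
    refine ⟨h1, ?_⟩
    rintro x (hx | ⟨kv', hkv', hxeq⟩)
    · exact h2 x (Or.inl ((mem_insortDesc acc _ x hacc).mpr (Or.inr hx)))
    · rcases List.mem_cons.mp hkv' with h | h
      · subst h
        exact h2 x (Or.inl ((mem_insortDesc acc _ x hacc).mpr (Or.inl hxeq)))
      · exact h2 x (Or.inr ⟨kv', h, hxeq⟩)

-- A's gap construction vs B's zip --------------------------------------------

theorem solBuild_reverse : ∀ (M : List Int) (this : Int) (acc : List Int),
    solBuild M.reverse this acc = (acc ++ gapsFrom this M, M.getLastD this) := by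
  intro M
  induction M with
  | nil => intro this acc; rw [solBuild]; simp [gapsFrom]
  | cons m M ih =>
    intro this acc
    rw [solBuild]
    split
    next hnone =>
      rw [List.reverse_cons, List.getLast?_concat] at hnone
      cases hnone
    next last heq =>
      rw [List.reverse_cons, List.getLast?_concat] at heq
      obtain rfl : m = last := by injection heq
      rw [List.reverse_cons, List.dropLast_concat, ih m (acc ++ [m - this])]
      simp [gapsFrom]
      cases M with
      | nil => simp
      | cons h t =>
        cases htl : (h :: t).getLast? with
        | none => simp at htl
        | some z => simp [htl]

theorem zip_gaps : ∀ (pts : List Int) (this dz : Int),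
    (List.zip (this :: pts) (pts ++ [dz])).map (fun ab => ab.2 - ab.1)
      = gapsFrom this pts ++ [dz - pts.getLastD this] := by
  intro pts
  induction pts with
  | nil => intro this dz; simp [gapsFrom]
  | cons p rest ih =>
    intro this dz
    simp only [List.cons_append, List.zip_cons_cons, List.map_cons]
    rw [ih p dz]
    simp [gapsFrom]
    cases rest with
    | nil => simp
    | cons h t =>
      cases htl : (h :: t).getLast? with
      | none => simp at htl
      | some z => simp [htl]

theorem length_gapsFrom : ∀ (M : List Int) (this : Int),
    (gapsFrom this M).length = M.length := by
  intro M
  induction M with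
  | nil => intro this; simp [gapsFrom]
  | cons m M ih => intro this; simp [gapsFrom, ih]

theorem sorted_rev_eq_reverse (rocks : List Int) :
    PySem.List.sorted rocks (fun x => x) true
      = (PySem.List.sorted rocks (fun x => x) false).reverse := by
  apply List.eq_of_perm_of_sorted (le := fun a b : Int => b ≤ a)
  · intro a b _ _ h1 h2; omega
  · exact PySem.List.sorted_pairwise_rev rocks (fun x => x)
  · exact List.pairwise_reverse.mpr (PySem.List.sorted_pairwise rocks (fun x => x))
  · exact ((PySem.List.sorted_perm rocks _ true).trans
      (PySem.List.sorted_perm rocks _ false).symm).trans (List.reverse_perm _).symm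

theorem foldl_const_iterate {α : Type} {β : Type} (f : β → β) :
    ∀ (l : List α) (x : β), l.foldl (fun d _ => f d) x = f^[l.length] x := by
  intro l
  induction l with
  | nil => intro x; simp
  | cons a l ih =>
    intro x
    simp only [List.foldl_cons, List.length_cons]
    rw [ih (f x), Function.iterate_succ_apply]


-- ===== VERDICT (by name: the statement is the Claim_ definition above) =====
theorem solution_spec : Claim_equal_solution := by
  intro distance rocks n _ hpre
  unfold Pre_solution at hpre
  unfold Spec_solution
  simp only [solution, solution_alt]
  rw [sorted_rev_eq_reverse, solBuild_reverse, zip_gaps, List.nil_append]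
  rw [foldl_const_iterate solStep, foldl_const_iterate altStep]
  set pts := PySem.List.sorted rocks (fun x => x) false with hpts
  set vals := gapsFrom 0 pts ++ [distance - pts.getLastD 0] with hvals
  set cells0 := PySem.List.enumerate vals 0 with hcells
  set q0 := cells0.foldl (fun q kv => insortDesc q (kv.2, kv.1)) [] with hq0
  set t := (PySem.List.pyRange 0 n 1).length with ht0
  have hmap : cells0.map Prod.snd = vals := PySem.List.map_snd_enumerate vals 0
  have hcl : cells0.length = rocks.length + 1 := by
    have hlm := congrArg List.length hmap
    simp only [List.length_map] at hlm
    rw [hlm, hvals]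
    simp [length_gapsFrom, hpts, PySem.List.length_sorted]
  have hq := foldl_insort_inv cells0 [] List.Pairwise.nil
  have hlive : LiveIn cells0 q0 := by
    intro c hc
    exact hq.2 (c.2, c.1) (Or.inr ⟨c, hc, rfl⟩)
  have ht : t < cells0.length := by
    rw [ht0, PySem.List.length_pyRange_one, hcl]
    omega
  have hAB : (altStep^[t] (cells0, q0)).1.map (fun c : Int × Int => c.2)
      = solStep^[t] vals := by
    have h1 := iter_eq t cells0 q0 ht (idsInc_enumerate vals 0) hq.1 hlive
    rw [hmap] at h1
    exact h1
  rw [hAB]
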